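-- pv_equiv track=rewrite | github.com/psnszsn/zmk-config | compare_layouts.py | parse_bindings
-- ===== SOURCE A (Python) =====
-- def parse_bindings(bindings_raw: str) -> list[str]:
--     """Parse individual bindings from raw string."""
--     bindings = []
--     tokens = bindings_raw.split()
--     i = 0
--     while i < len(tokens):
--         if tokens[i].startswith('&'):
--             binding = tokens[i]
--             i += 1
--             while i < len(tokens) and not tokens[i].startswith('&'):
--                 binding += ' ' + tokens[i]
--                 i += 1
--             bindings.append(binding)
--         else:
--             i += 1
--     return bindings
-- ===== SOURCE B (Python) =====
-- def parse_bindings(bindings_raw: str) -> list[str]: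
--     """Parse individual bindings from raw string."""
--     groups: list[list[str]] = []
--     for token in bindings_raw.split():
--         if token.startswith('&'):
--             groups.append([token])
--         elif groups:
--             groups[-1].append(token)
--     return [' '.join(g) for g in groups]
-- ===== Notes on version B (the rewrite author's own statement) =====
-- stated objective: simpler
-- what changed: Replaced the index-driven outer/inner while loops and incremental string concatenation with one flat for-loop that maintains a list of token groups (new group on an ampersand-prefixed token, extend the last group otherwise) followed by a space-join of each group.
import Mathlib
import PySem

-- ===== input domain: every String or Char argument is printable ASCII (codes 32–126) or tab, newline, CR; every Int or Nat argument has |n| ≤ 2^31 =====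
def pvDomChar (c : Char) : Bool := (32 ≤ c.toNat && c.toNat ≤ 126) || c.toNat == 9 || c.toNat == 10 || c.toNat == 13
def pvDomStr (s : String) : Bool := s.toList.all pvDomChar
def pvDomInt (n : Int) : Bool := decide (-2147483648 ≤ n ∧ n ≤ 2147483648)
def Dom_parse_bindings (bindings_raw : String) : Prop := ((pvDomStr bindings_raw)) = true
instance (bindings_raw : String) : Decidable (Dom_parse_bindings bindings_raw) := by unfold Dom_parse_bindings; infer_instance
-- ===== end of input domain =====

-- B replaces A's nested while loops and incremental string concatenation by one flat
-- loop maintaining a list of token groups, joined at the end (objective: simpler).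

-- ===== PORT A =====
-- binding + ' ' + t, via PySem.Str.join (exact; Lean's String.append is avoided per PySem)
def pvCat (a b : String) : String := PySem.Str.join " " [a, b]

-- inner while loop of A: consume tokens until the next '&'-token, growing `binding`
def pbInner : List String → String → String × List String
  | [], b => (b, [])
  | t :: ts, b =>
    if PySem.Str.startswith t "&" then (b, t :: ts)
    else pbInner ts (pvCat b t)

-- (termination fact for the outer loop; the port cites it in decreasing_by)
theorem pbInner_len (ts : List String) (b : String) :
    (pbInner ts b).2.length ≤ ts.length := by
  induction ts generalizing b with
  | nil => simp [pbInner]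
  | cons t ts ih =>
    simp only [pbInner]
    split
    · simp
    · exact le_trans (ih _) (Nat.le_succ _)

-- outer while loop of A, on the list of not-yet-consumed tokens
def pbOuter : List String → List String → List String
  | [], acc => acc
  | t :: ts, acc =>
    if PySem.Str.startswith t "&" then
      pbOuter (pbInner ts t).2 (acc ++ [(pbInner ts t).1])
    else pbOuter ts acc
termination_by ts _ => ts.length
decreasing_by
  · exact Nat.lt_succ_of_le (pbInner_len ts t)
  · exact Nat.lt_succ_self _

def parse_bindings (bindings_raw : String) : List String :=
  pbOuter (PySem.Str.split₀ bindings_raw) []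

-- ===== PORT B =====
-- one step of B's flat loop over groups: new group on an '&'-token, else extend the last group
def pbStep (g : List (List String)) (t : String) : List (List String) :=
  if PySem.Str.startswith t "&" then g ++ [[t]]
  else if g.isEmpty then g
  else g.dropLast ++ [g.getLastD [] ++ [t]]

def parse_bindings_alt (bindings_raw : String) : List String :=
  ((PySem.Str.split₀ bindings_raw).foldl pbStep []).map (fun gr => PySem.Str.join " " gr)

-- ===== PRECONDITION & SPEC =====
def Spec_parse_bindings (bindings_raw : String) (out : List String) : Prop := out = parse_bindings_alt bindings_raw
instance (bindings_raw : String) (out : List String) : Decidable (Spec_parse_bindings bindings_raw out) := by unfold Spec_parse_bindings; infer_instance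

-- ===== CLAIM (what is proved, stated in full; the proofs are below) =====
def Claim_equal_parse_bindings : Prop := ∀ (bindings_raw : String), Dom_parse_bindings bindings_raw → Spec_parse_bindings bindings_raw (parse_bindings bindings_raw)

-- ===== LEMMAS AND PROOFS =====

theorem pbStep_amp (g : List (List String)) (t : String)
    (h : PySem.Str.startswith t "&" = true) : pbStep g t = g ++ [[t]] := by
  unfold pbStep; rw [if_pos h]

theorem pbStep_nil (t : String) (h : ¬ PySem.Str.startswith t "&" = true) :
    pbStep [] t = [] := by
  unfold pbStep; rw [if_neg h]; rfl

theorem pbStep_last (g : List (List String)) (t : String)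
    (h : ¬ PySem.Str.startswith t "&" = true) (hg : g ≠ []) :
    pbStep g t = g.dropLast ++ [g.getLastD [] ++ [t]] := by
  unfold pbStep
  rw [if_neg h, if_neg (by simp [List.isEmpty_iff, hg])]

theorem pbStep_ne_nil (g : List (List String)) (t : String) (h : g ≠ []) :
    pbStep g t ≠ [] := by
  by_cases hamp : PySem.Str.startswith t "&" = true
  · rw [pbStep_amp g t hamp]; simp
  · rw [pbStep_last g t hamp h]; simp

theorem pbStep_append (g1 g2 : List (List String)) (t : String) (h : g2 ≠ []) :
    pbStep (g1 ++ g2) t = g1 ++ pbStep g2 t := by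
  by_cases hamp : PySem.Str.startswith t "&" = true
  · rw [pbStep_amp _ _ hamp, pbStep_amp _ _ hamp, List.append_assoc]
  · rw [pbStep_last _ _ hamp (by simp [h]), pbStep_last _ _ hamp h,
      List.dropLast_append_of_ne_nil h, List.append_assoc]
    congr 2
    obtain ⟨g2', x, rfl⟩ := (List.eq_nil_or_concat g2).resolve_left h
    simp only [List.concat_eq_append, ← List.append_assoc, List.getLastD_concat]

theorem foldl_pbStep_append (ts : List String) (g1 g2 : List (List String)) (h : g2 ≠ []) :
    List.foldl pbStep (g1 ++ g2) ts = g1 ++ List.foldl pbStep g2 ts := by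
  induction ts generalizing g2 with
  | nil => rfl
  | cons t ts ih =>
    simp only [List.foldl_cons]
    rw [pbStep_append g1 g2 t h, ih _ (pbStep_ne_nil g2 t h)]

-- join " " [t] = t
theorem join_single (t : String) : PySem.Str.join " " [t] = t := by
  apply String.toList_inj.mp
  simp [PySem.Str.toList_join, PySem.Chars.join_singleton]

-- join " " (g ++ [x]) = join " " g + ' ' + x  for nonempty g
theorem join_snoc (g : List String) (x : String) (h : g ≠ []) :
    PySem.Str.join " " (g ++ [x]) = pvCat (PySem.Str.join " " g) x := by
  apply String.toList_inj.mp
  simp only [pvCat, PySem.Str.toList_join, List.map_append, List.map_cons, List.map_nil]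
  induction g with
  | nil => exact absurd rfl h
  | cons a g ih =>
    cases g with
    | nil =>
      simp [PySem.Chars.join_singleton, PySem.Chars.join_cons_cons]
    | cons b g =>
      simp only [List.map_cons, List.cons_append, PySem.Chars.join_cons_cons,
        List.append_assoc] at *
      rw [ih (by simp)]

-- the inner while loop of A against B's foldl running on a single open group
theorem inner_eq (ts : List String) (cur : List String) (b : String)
    (hc : cur ≠ []) (hb : PySem.Str.join " " cur = b) :
    (List.foldl pbStep [cur] ts).map (fun gr => PySem.Str.join " " gr)
      = (pbInner ts b).1 ::
        (List.foldl pbStep ([] : List (List String)) (pbInner ts b).2).map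
          (fun gr => PySem.Str.join " " gr) := by
  induction ts generalizing cur b with
  | nil => simp [pbInner, hb]
  | cons t ts ih =>
    by_cases hamp : PySem.Str.startswith t "&" = true
    · simp only [pbInner, hamp, if_pos, List.foldl_cons,
        pbStep_amp [cur] t hamp, pbStep_amp ([] : List (List String)) t hamp,
        List.nil_append]
      rw [foldl_pbStep_append ts [cur] [[t]] (by simp)]
      simp [hb]
    · have h1 : pbStep [cur] t = [cur ++ [t]] := by
        rw [pbStep_last [cur] t hamp (by simp)]; rfl
      simp only [pbInner, hamp, List.foldl_cons, h1, Bool.false_eq_true, if_false]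
      exact ih (cur ++ [t]) (pvCat b t) (by simp)
        (by rw [join_snoc cur t hc, hb])

-- the outer while loop of A against B's foldl, strong induction on the token count
theorem outer_eq (n : Nat) (ts : List String) (hn : ts.length ≤ n) (acc : List String) :
    pbOuter ts acc
      = acc ++ (List.foldl pbStep ([] : List (List String)) ts).map
          (fun gr => PySem.Str.join " " gr) := by
  induction n generalizing ts acc with
  | zero =>
    have : ts = [] := List.eq_nil_of_length_eq_zero (Nat.le_zero.mp hn)
    subst this; simp [pbOuter]
  | succ m ih =>
    cases ts with
    | nil => simp [pbOuter]
    | cons t ts =>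
      by_cases hamp : PySem.Str.startswith t "&" = true
      · simp only [pbOuter, hamp, if_pos, List.foldl_cons,
          pbStep_amp ([] : List (List String)) t hamp, List.nil_append]
        rw [ih _ (le_trans (pbInner_len ts t) (Nat.succ_le_succ_iff.mp hn)) _,
          inner_eq ts [t] t (by simp) (join_single t)]
        simp
      · simp only [pbOuter, hamp, List.foldl_cons,
          pbStep_nil t hamp, Bool.false_eq_true, if_false]
        exact ih ts (Nat.succ_le_succ_iff.mp hn) acc

-- ===== VERDICT (by name: the statement is the Claim_ definition above) =====
theorem parse_bindings_spec : Claim_equal_parse_bindings := by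
  intro s _
  unfold Spec_parse_bindings parse_bindings parse_bindings_alt
  rw [outer_eq (PySem.Str.split₀ s).length _ le_rfl []]
  rfl
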